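-- pv_equiv track=rewrite | github.com/k4pran/Baum-Sweet-Sequence-Challenge | baum_sweet_sequence.py | baumify
-- ===== SOURCE A (Python) =====
-- def to_bin(n):
--     return str("{0:b}".format(n))
--
-- def baumify(dec):
--     if dec == 0 or dec == 1:
--         return 1
--
--     count = 0
--     bin = to_bin(dec)
--     for bit in bin:
--         if bit == '1':
--             if count > 0 and count % 2 == 1:
--                 return 0
--             count = 0
--
--         else:
--             count += 1
--
--     if count > 0 and count % 2 == 1:
--         return 0
--
--     return 1
-- ===== SOURCE B (Python) =====
-- def to_bin(n):
--     return str("{0:b}".format(n))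
--
-- def baumify(dec):
--     if dec == 0 or dec == 1:
--         return 1
--     for seg in to_bin(dec).split('1'):
--         if len(seg) % 2 == 1:
--             return 0
--     return 1
-- ===== Notes on version B (the rewrite author's own statement) =====
-- stated objective: simpler
-- what changed: Replaces the streaming run-length counter with resets by materializing the maximal zero runs via split('1') and checking each segment's length parity.
import Mathlib
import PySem

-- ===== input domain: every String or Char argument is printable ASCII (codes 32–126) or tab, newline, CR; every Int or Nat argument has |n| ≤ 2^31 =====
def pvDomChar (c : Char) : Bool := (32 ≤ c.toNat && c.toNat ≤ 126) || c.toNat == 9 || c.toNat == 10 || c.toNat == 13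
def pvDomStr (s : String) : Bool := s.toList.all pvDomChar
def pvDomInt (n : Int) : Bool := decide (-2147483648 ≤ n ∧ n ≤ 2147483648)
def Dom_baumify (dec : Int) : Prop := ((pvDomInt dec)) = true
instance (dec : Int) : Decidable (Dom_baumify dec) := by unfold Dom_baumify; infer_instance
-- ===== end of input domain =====

-- B replaces A's streaming zero-run counter with split('1')-then-check-parity; objective: simpler.

-- ===== PORT A =====
def to_bin (n : Int) : String := PySem.Int.toBin n

-- the for-loop over the binary string with early return 0
def baumLoop : List Char → Int → Int
  | [], count => if count > 0 && PySem.Int.mod count 2 == 1 then 0 else 1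
  | bit :: rest, count =>
      if bit == '1' then
        if count > 0 && PySem.Int.mod count 2 == 1 then 0
        else baumLoop rest 0
      else baumLoop rest (count + 1)

def baumify (dec : Int) : Int :=
  if dec == 0 || dec == 1 then 1
  else baumLoop (to_bin dec).toList 0

-- ===== PORT B =====
-- the for-loop over the segments of bin.split('1') with early return 0
def segCheck : List (List Char) → Int
  | [] => 1
  | seg :: rest => if (seg.length : Int) % 2 == 1 then 0 else segCheck rest

def baumify_alt (dec : Int) : Int :=
  if dec == 0 || dec == 1 then 1
  else segCheck (PySem.Chars.splitOn (to_bin dec).toList ['1'])  -- s.split('1'), nonempty separator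

-- ===== PRECONDITION & SPEC =====
def Spec_baumify (dec : Int) (out : Int) : Prop := out = baumify_alt dec
instance (dec : Int) (out : Int) : Decidable (Spec_baumify dec out) := by unfold Spec_baumify; infer_instance

-- ===== CLAIM (what is proved, stated in full; the proofs are below) =====
def Claim_equal_baumify : Prop := ∀ (dec : Int), Dom_baumify dec → Spec_baumify dec (baumify dec)

-- ===== LEMMAS AND PROOFS =====

-- proof-only recursion characterising splitOn with the single-char separator '1'
def splitc : List Char → List Char → List (List Char)
  | pre, [] => [pre]
  | pre, c :: r => if c = '1' then pre :: splitc [] r else splitc (pre ++ [c]) r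

theorem splitOn_go_eq (fuel : Nat) (l cur : List Char) (acc : List (List Char))
    (h : l.length ≤ fuel) :
    PySem.Chars.splitOn.go ['1'] fuel l cur acc = acc.reverse ++ splitc cur.reverse l := by
  induction fuel generalizing l cur acc with
  | zero =>
      have : l = [] := by cases l <;> simp_all
      subst this
      simp [PySem.Chars.splitOn.go, splitc]
  | succ n ih =>
      cases l with
      | nil => simp [PySem.Chars.splitOn.go, splitc]
      | cons c rest =>
          by_cases hc : c = '1'
          · subst hc
            rw [PySem.Chars.splitOn.go]
            simp only [List.isPrefixOf, List.length]
            rw [if_pos (by simp)]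
            simp only [List.drop_succ_cons, List.drop_zero]
            rw [ih rest [] (cur.reverse :: acc) (by simpa using Nat.le_of_succ_le_succ h)]
            simp [splitc]
          · rw [PySem.Chars.splitOn.go]
            rw [if_neg (by simp [List.isPrefixOf]; intro h'; exact hc h'.symm)]
            rw [ih rest (c :: cur) acc (by simpa using Nat.le_of_succ_le_succ h)]
            simp [splitc, hc]

theorem splitOn_eq_splitc (l : List Char) :
    PySem.Chars.splitOn l ['1'] = splitc [] l := by
  rw [PySem.Chars.splitOn, splitOn_go_eq (l.length + 1) l [] [] (Nat.le_succ _)]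
  simp

theorem parity_cond (n : Nat) :
    (decide ((n : Int) > 0) && (PySem.Int.mod (n : Int) 2 == 1)) = ((n : Int) % 2 == 1) := by
  rw [show PySem.Int.mod (n : Int) 2 = (n : Int) % 2 from PySem.Int.mod_eq_emod_of_pos (by norm_num)]
  by_cases h : (n : Int) % 2 = 1
  · simp [h]
    omega
  · have h1 : ((n : Int) % 2 == 1) = false := by simp [h]
    simp [h1]

theorem segCheck_splitc_eq_baumLoop (l : List Char) (pre : List Char) (c : Int)
    (hc : c = (pre.length : Int)) :
    segCheck (splitc pre l) = baumLoop l c := by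
  induction l generalizing pre c with
  | nil =>
      subst hc
      rw [splitc, segCheck, baumLoop, parity_cond]
      rfl
  | cons ch rest ih =>
      by_cases hch : ch = '1'
      · subst hch
        subst hc
        rw [splitc, if_pos rfl, segCheck, baumLoop,
          if_pos (by simp : ('1' == '1') = true), parity_cond, ih [] 0 rfl]
      · rw [splitc, if_neg hch, baumLoop, if_neg (by simp [hch] : ¬ (ch == '1') = true)]
        exact ih (pre ++ [ch]) (c + 1) (by simp [hc])

-- ===== VERDICT (by name: the statement is the Claim_ definition above) =====
theorem baumify_spec : Claim_equal_baumify := by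
  intro dec _
  unfold Spec_baumify baumify baumify_alt
  by_cases h : (dec == 0 || dec == 1) = true
  · simp [h]
  · simp only [h, if_false, Bool.false_eq_true]
    rw [splitOn_eq_splitc, segCheck_splitc_eq_baumLoop _ [] 0 rfl]
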